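-- pv_equiv track=rewrite | github.com/jacopopezzuto/leetcode | 1941-check-if-all-characters-have-equal-number-of-occurrences/1941-check-if-all-characters-have-equal-number-of-occurrences.py | areOccurrencesEqual
-- ===== SOURCE A (Python) =====
-- def areOccurrencesEqual(s: str) -> bool:
--     dict = {}
--     for c in s:
--         if dict.get(c,-1) > 0:
--             dict[c] = dict.get(c,-1)+1
--         else:
--             dict[c] = 1
--     first_size = dict[s[0]]
--     for item in dict:
--         if first_size != dict[item]:
--             return False
--     return True
-- ===== SOURCE B (Python) =====
-- def areOccurrencesEqual(s: str) -> bool: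
--     # sort the characters so equal ones are adjacent, then collect run lengths
--     t = sorted(s)
--     runs = []
--     prev = None
--     run = 0
--     for c in t:
--         if c == prev:
--             run += 1
--         else:
--             if prev is not None:
--                 runs.append(run)
--             prev = c
--             run = 1
--     runs.append(run)
--     return min(runs) == max(runs)
-- ===== Notes on version B (the rewrite author's own statement) =====
-- stated objective: alternative
-- what changed: Replaced A's hash-map counting plus compare-to-first-key loop by a sort-then-group pass: sort the characters, collect the lengths of consecutive equal runs in one scan, and answer whether the smallest run length equals the largest; no dictionary is used.
import Mathlib
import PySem

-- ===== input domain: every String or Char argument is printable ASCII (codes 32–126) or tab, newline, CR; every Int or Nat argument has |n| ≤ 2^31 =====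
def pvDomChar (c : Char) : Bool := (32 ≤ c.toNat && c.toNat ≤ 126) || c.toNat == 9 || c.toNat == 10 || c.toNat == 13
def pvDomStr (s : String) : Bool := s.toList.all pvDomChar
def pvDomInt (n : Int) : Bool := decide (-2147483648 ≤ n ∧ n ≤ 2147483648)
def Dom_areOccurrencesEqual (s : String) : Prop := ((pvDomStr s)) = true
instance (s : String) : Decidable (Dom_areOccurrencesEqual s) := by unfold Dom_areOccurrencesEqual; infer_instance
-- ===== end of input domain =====

-- B replaces A's dict counting and compare-to-first loop by sort-then-group: sort the characters,
-- collect consecutive run lengths in one scan, and compare the smallest with the largest run (objective: alternative).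

-- ===== PORT A =====
-- loop body of A's first for-loop: dict[c] = dict.get(c,-1)+1 if dict.get(c,-1) > 0 else 1
def pvStepA (d : PySem.Dict Char Int) (c : Char) : PySem.Dict Char Int :=
  if d.getD c (-1) > 0 then d.insert c (d.getD c (-1) + 1) else d.insert c 1

-- A's second loop: 'for item in dict: if first_size != dict[item]: return False'
-- (dict[item] over a key of the dict: get? is some there, the .getD 0 never fires)
def pvCheckA (d : PySem.Dict Char Int) (first : Int) : List Char → Bool
  | [] => true
  | k :: ks => if first ≠ (d.get? k).getD 0 then false else pvCheckA d first ks

def areOccurrencesEqual (s : String) : Bool :=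
  let d := s.toList.foldl pvStepA PySem.Dict.empty
  match PySem.Str.pyGet? s 0 with
  | none => false            -- s[0] raises IndexError on the empty string; excluded by Pre_
  | some c0 =>
    match d.get? c0 with
    | none => false          -- dict[s[0]] KeyError; unreachable (s[0] was counted)
    | some first_size => pvCheckA d first_size d.keys

-- ===== PORT B =====
-- loop body of B's scan over the sorted characters; state = (prev, run, runs)
def pvRunStepB (st : Option Char × Int × List Int) (c : Char) : Option Char × Int × List Int :=
  match st with
  | (prev, run, runs) =>
    if some c == prev then (prev, run + 1, runs)
    else (some c, 1, match prev with
                     | none => runs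
                     | some _ => runs ++ [run])

def areOccurrencesEqual_alt (s : String) : Bool :=
  let t := PySem.List.sorted s.toList (fun c => c) false
  let st := t.foldl pvRunStepB (none, 0, [])
  let runs := st.2.2 ++ [st.2.1]
  PySem.List.min? runs (fun x => x) == PySem.List.max? runs (fun x => x)

-- ===== PRECONDITION & SPEC =====
-- Pre_ excludes only the empty string, on which A raises IndexError at s[0].
def Pre_areOccurrencesEqual (s : String) : Prop := s ≠ ""
instance (s : String) : Decidable (Pre_areOccurrencesEqual s) := by unfold Pre_areOccurrencesEqual; infer_instance
def pvWitness_areOccurrencesEqual : String := "aabb"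

def Spec_areOccurrencesEqual (s : String) (out : Bool) : Prop := out = areOccurrencesEqual_alt s
instance (s : String) (out : Bool) : Decidable (Spec_areOccurrencesEqual s out) := by unfold Spec_areOccurrencesEqual; infer_instance

-- ===== CLAIM (what is proved, stated in full; the proofs are below) =====
def Claim_equal_areOccurrencesEqual : Prop := ∀ (s : String), Dom_areOccurrencesEqual s → Pre_areOccurrencesEqual s → Spec_areOccurrencesEqual s (areOccurrencesEqual s)

-- ===== LEMMAS AND PROOFS =====

-- "all characters of l occur equally often": the common meaning both programs decide
def pvAllEq (l : List Char) : Prop := ∀ a ∈ l, ∀ b ∈ l, l.count a = l.count b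

---------------- A side ----------------

-- invariant of A's dict: every stored value is positive
def pvInv (d : PySem.Dict Char Int) : Prop := ∀ k v, d.get? k = some v → 0 < v

lemma pvStepA_eq (d : PySem.Dict Char Int) (c : Char) (h : pvInv d) :
    pvStepA d c = d.insert c (d.getD c 0 + 1) := by
  unfold pvStepA
  cases hg : d.get? c with
  | none =>
      rw [PySem.Dict.getD_of_get?_eq_none d (-1) hg, PySem.Dict.getD_of_get?_eq_none d 0 hg]
      norm_num
  | some v =>
      have hv := h c v hg
      rw [PySem.Dict.getD_of_get?_eq_some d (-1) hg, PySem.Dict.getD_of_get?_eq_some d 0 hg]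
      simp [hv]

lemma pvInv_step (d : PySem.Dict Char Int) (c : Char) (h : pvInv d) : pvInv (pvStepA d c) := by
  rw [pvStepA_eq d c h]
  intro k v hk
  rw [PySem.Dict.get?_insert] at hk
  split at hk
  · have h0 : 0 ≤ d.getD c 0 := by
      cases hg : d.get? c with
      | none => rw [PySem.Dict.getD_of_get?_eq_none d 0 hg]
      | some w => rw [PySem.Dict.getD_of_get?_eq_some d 0 hg]; exact le_of_lt (h c w hg)
    cases hk; omega
  · exact h k v hk

lemma pvFoldA_eq (l : List Char) : ∀ d, pvInv d →
    l.foldl pvStepA d = l.foldl (fun d x => d.insert x (d.getD x 0 + 1)) d := by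
  induction l with
  | nil => intro d _; rfl
  | cons c l ih =>
      intro d h
      simp only [List.foldl_cons]
      rw [pvStepA_eq d c h, ← pvStepA_eq d c h]
      exact ih _ (pvInv_step d c h)

lemma pvDictA_eq_counter (l : List Char) :
    l.foldl pvStepA PySem.Dict.empty = PySem.Dict.counter l := by
  rw [pvFoldA_eq l PySem.Dict.empty (by intro k v hk; simp [PySem.Dict.get?_empty] at hk)]
  exact PySem.Dict.foldl_insert_getD_add_one_eq_counter l

lemma pvCheckA_iff (d : PySem.Dict Char Int) (f : Int) (ks : List Char) :
    pvCheckA d f ks = true ↔ ∀ k ∈ ks, f = (d.get? k).getD 0 := by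
  induction ks with
  | nil => simp [pvCheckA]
  | cons k ks ih =>
      unfold pvCheckA
      by_cases h : f ≠ (d.get? k).getD 0
      · rw [if_pos h]
        constructor
        · intro hf; exact absurd hf (by simp)
        · intro hall; exact absurd (hall k (by simp)) h
      · rw [not_not] at h
        rw [if_neg (by simp [h]), ih]
        constructor
        · intro hall x hx
          rcases List.mem_cons.mp hx with rfl | hx
          · exact h
          · exact hall x hx
        · intro hall x hx
          exact hall x (List.mem_cons_of_mem _ hx)

-- A decides pvAllEq of its character list
lemma pvA_iff (s : String) (c0 : Char) (rest : List Char) (ht : s.toList = c0 :: rest) :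
    areOccurrencesEqual s = true ↔ pvAllEq (c0 :: rest) := by
  unfold areOccurrencesEqual
  have hget : PySem.Str.pyGet? s 0 = some c0 := by
    simp [PySem.Str.pyGet?_eq, ht, PySem.List.pyGet?, PySem.List.pyIdx?]
  have hgc0 : (PySem.Dict.counter (c0 :: rest)).get? c0 =
      some ((List.count c0 (c0 :: rest) : Int)) := by
    have hc : (PySem.Dict.counter (c0 :: rest)).contains c0 = true := by
      rw [PySem.Dict.contains_counter]; simp
    cases hg : (PySem.Dict.counter (c0 :: rest)).get? c0 with
    | none => rw [PySem.Dict.contains_eq_isSome_get?, hg] at hc; simp at hc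
    | some v =>
        have h2 := PySem.Dict.getD_counter (c0 :: rest) c0
        rw [PySem.Dict.getD_of_get?_eq_some _ 0 hg] at h2
        rw [h2]
  rw [ht, pvDictA_eq_counter, hget]
  simp only [hgc0]
  rw [pvCheckA_iff]
  constructor
  · intro h a ha b hb
    have hka := h a (by rw [PySem.Dict.keys_counter]; exact (PySem.Set.mem_ofList _ _).mpr ha)
    have hkb := h b (by rw [PySem.Dict.keys_counter]; exact (PySem.Set.mem_ofList _ _).mpr hb)
    rw [← PySem.Dict.getD_eq_get?_getD, PySem.Dict.getD_counter] at hka hkb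
    have := hka.symm.trans hkb
    exact_mod_cast this
  · intro h k hk
    rw [PySem.Dict.keys_counter] at hk
    have hk' : k ∈ c0 :: rest := (PySem.Set.mem_ofList _ _).mp hk
    rw [← PySem.Dict.getD_eq_get?_getD, PySem.Dict.getD_counter]
    exact_mod_cast h c0 (by simp) k hk'

---------------- B side ----------------

-- the run lengths B's scan produces from a block starting at c0 with k occurrences seen
def pvSpecRuns (c0 : Char) (k : Int) : List Char → List Int
  | [] => [k]
  | c :: cs => if c = c0 then pvSpecRuns c0 (k + 1) cs else k :: pvSpecRuns c 1 cs

lemma pvFoldRuns (cs : List Char) : ∀ (c0 : Char) (k : Int) (acc : List Int),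
    (cs.foldl pvRunStepB (some c0, k, acc)).2.2 ++ [(cs.foldl pvRunStepB (some c0, k, acc)).2.1]
      = acc ++ pvSpecRuns c0 k cs := by
  induction cs with
  | nil => intro c0 k acc; simp [pvSpecRuns]
  | cons c cs ih =>
      intro c0 k acc
      by_cases hc : c = c0
      · subst hc
        simp only [List.foldl_cons, pvRunStepB, beq_self_eq_true, if_pos]
        rw [ih c (k + 1) acc]
        simp [pvSpecRuns]
      · have hb : (some c == some c0) = false := by simp [hc]
        simp only [List.foldl_cons, pvRunStepB, hb, Bool.false_eq_true, if_false]
        rw [ih c 1 (acc ++ [k])]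
        simp [pvSpecRuns, hc]

-- on a sorted tail, "all run lengths equal m" is "the c0-block has size m and every later character's count is m"
lemma pvSpecRuns_allEq (cs : List Char) : ∀ (c0 : Char) (k m : Int),
    (c0 :: cs).Pairwise (· ≤ ·) →
    ((∀ x ∈ pvSpecRuns c0 k cs, x = m) ↔
      (k + (cs.count c0 : Int) = m ∧ ∀ a ∈ cs, c0 < a → (cs.count a : Int) = m)) := by
  induction cs with
  | nil => intro c0 k m _; simp [pvSpecRuns]
  | cons c cs ih =>
      intro c0 k m hp
      have hp' : (c :: cs).Pairwise (· ≤ ·) := hp.tail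
      have hc0c : c0 ≤ c := (List.pairwise_cons.mp hp).1 c (by simp)
      have hcle : ∀ x ∈ cs, c ≤ x := fun x hx => (List.pairwise_cons.mp hp').1 x hx
      by_cases hc : c = c0
      · subst hc
        rw [show pvSpecRuns c k (c :: cs) = pvSpecRuns c (k + 1) cs from by simp [pvSpecRuns]]
        rw [ih c (k + 1) m hp']
        constructor
        · rintro ⟨h1, h2⟩
          refine ⟨by rw [List.count_cons_self]; push_cast; omega, ?_⟩
          intro a ha hlt
          rcases List.mem_cons.mp ha with rfl | ha'
          · exact absurd hlt (lt_irrefl a)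
          · rw [List.count_cons_of_ne (ne_of_lt hlt)]
            exact h2 a ha' hlt
        · rintro ⟨h1, h2⟩
          rw [List.count_cons_self] at h1
          refine ⟨by push_cast at h1 ⊢; omega, ?_⟩
          intro a ha hlt
          have := h2 a (by simp [ha]) hlt
          rwa [List.count_cons_of_ne (ne_of_lt hlt)] at this
      · have hlt : c0 < c := lt_of_le_of_ne hc0c (fun h => hc h.symm)
        have hnc0 : ∀ x ∈ c :: cs, x ≠ c0 := by
          intro x hx
          rcases List.mem_cons.mp hx with rfl | hx'
          · exact hc
          · exact fun h => absurd (h ▸ hcle x hx') (not_le.mpr hlt)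
        have hcount0 : (c :: cs).count c0 = 0 :=
          List.count_eq_zero.mpr (fun h => hnc0 c0 h rfl)
        simp only [pvSpecRuns, if_neg hc]
        rw [List.forall_mem_cons, ih c 1 m hp']
        constructor
        · rintro ⟨hk, h1, h2⟩
          refine ⟨by rw [hcount0]; push_cast; omega, ?_⟩
          intro a ha hca
          rcases List.mem_cons.mp ha with rfl | ha'
          · rw [List.count_cons_self]; push_cast; omega
          · rcases eq_or_lt_of_le (hcle a ha') with rfl | hlt2
            · rw [List.count_cons_self]; push_cast; omega
            · rw [List.count_cons_of_ne (ne_of_lt hlt2)]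
              exact h2 a ha' hlt2
        · rintro ⟨hk, h2⟩
          rw [hcount0] at hk
          push_cast at hk
          have hcm := h2 c (by simp) hlt
          rw [List.count_cons_self] at hcm
          refine ⟨by omega, by push_cast at hcm ⊢; omega, ?_⟩
          intro a ha hca
          have := h2 a (by simp [ha]) (lt_trans hlt hca)
          rwa [List.count_cons_of_ne (ne_of_lt hca)] at this

-- min(runs) == max(runs) on a nonempty list says all elements coincide
lemma pvMinMax (x : Int) (t : List Int) :
    ((PySem.List.min? (x :: t) (fun y => y) == PySem.List.max? (x :: t) (fun y => y)) = true)
      ↔ ∃ m, ∀ a ∈ x :: t, a = m := by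
  rw [PySem.List.min?_id_cons, PySem.List.max?_id_cons]
  constructor
  · intro h
    have heq : t.foldl min x = t.foldl max x := by simpa using h
    refine ⟨t.foldl min x, fun a ha => ?_⟩
    have h1 := PySem.List.min?_isMin (PySem.List.min?_id_cons x t) a ha
    have h2 := PySem.List.max?_isMax (PySem.List.max?_id_cons x t) a ha
    simp only at h1 h2
    omega
  · rintro ⟨m, hm⟩
    have h1 : t.foldl min x = m :=
      hm _ (PySem.List.min?_mem (PySem.List.min?_id_cons x t))
    have h2 : t.foldl max x = m :=
      hm _ (PySem.List.max?_mem (PySem.List.max?_id_cons x t))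
    simp [h1, h2]

-- bridging the sorted-runs condition to pvAllEq of the sorted list
lemma pvBridge (c0 : Char) (rest : List Char) (hp : (c0 :: rest).Pairwise (· ≤ ·)) :
    ((∀ a ∈ rest, c0 < a → (rest.count a : Int) = 1 + rest.count c0) ↔ pvAllEq (c0 :: rest)) := by
  have key : (∀ a ∈ rest, c0 < a → (rest.count a : Int) = 1 + rest.count c0) ↔
      (∀ a ∈ c0 :: rest, (c0 :: rest).count a = (c0 :: rest).count c0) := by
    constructor
    · intro h a ha
      rcases List.mem_cons.mp ha with rfl | ha'
      · rfl
      · rcases eq_or_lt_of_le ((List.pairwise_cons.mp hp).1 a ha') with rfl | hlt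
        · rfl
        · rw [List.count_cons_of_ne (ne_of_lt hlt), List.count_cons_self]
          have := h a ha' hlt
          omega
    · intro h a ha hlt
      have := h a (by simp [ha])
      rw [List.count_cons_of_ne (ne_of_lt hlt), List.count_cons_self] at this
      omega
  rw [key]
  constructor
  · intro h a ha b hb; rw [h a ha, h b hb]
  · intro h a ha; exact h a ha c0 (by simp)

-- B decides pvAllEq of the sorted character list
lemma pvB_iff (s : String) (c0 : Char) (rest : List Char)
    (hsort : PySem.List.sorted s.toList (fun c => c) false = c0 :: rest) :
    areOccurrencesEqual_alt s = true ↔ pvAllEq (c0 :: rest) := by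
  have hp : (c0 :: rest).Pairwise (· ≤ ·) := by
    have := PySem.List.sorted_pairwise s.toList (fun c => c) (κ := Char)
    rwa [hsort] at this
  unfold areOccurrencesEqual_alt
  rw [hsort]
  have hstep : pvRunStepB (none, 0, []) c0 = (some c0, 1, []) := by
    simp [pvRunStepB]
  simp only [List.foldl_cons, hstep]
  have hruns := pvFoldRuns rest c0 1 []
  simp only [List.nil_append] at hruns
  rw [hruns]
  cases hsr : pvSpecRuns c0 1 rest with
  | nil =>
      exfalso
      have : ∀ (l : List Char) (c : Char) (k : Int), pvSpecRuns c k l ≠ [] := by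
        intro l
        induction l with
        | nil => intro c k; simp [pvSpecRuns]
        | cons x xs ih =>
            intro c k
            unfold pvSpecRuns
            split
            · exact ih c (k + 1)
            · simp
      exact this rest c0 1 hsr
  | cons x tl =>
      rw [pvMinMax, ← hsr]
      constructor
      · rintro ⟨m, hm⟩
        have := (pvSpecRuns_allEq rest c0 1 m hp).mp hm
        rw [← pvBridge c0 rest hp]
        intro a ha hlt
        rw [this.2 a ha hlt, ← this.1]
      · intro h
        refine ⟨1 + (rest.count c0 : Int), ?_⟩
        rw [pvSpecRuns_allEq rest c0 1 _ hp]
        exact ⟨rfl, (pvBridge c0 rest hp).mpr h⟩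

-- pvAllEq is invariant under permutation (counts and membership are)
lemma pvAllEq_perm (t l : List Char) (hperm : t.Perm l) : pvAllEq t ↔ pvAllEq l := by
  unfold pvAllEq
  constructor
  · intro h a ha b hb
    have := h a (hperm.mem_iff.mpr ha) b (hperm.mem_iff.mpr hb)
    rwa [hperm.count_eq, hperm.count_eq] at this
  · intro h a ha b hb
    have := h a (hperm.mem_iff.mp ha) b (hperm.mem_iff.mp hb)
    rwa [← hperm.count_eq, ← hperm.count_eq] at this

-- ===== VERDICT (by name: the statements are the Claim_ definitions above) =====
theorem areOccurrencesEqual_spec : Claim_equal_areOccurrencesEqual := by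
  intro s _ hpre
  unfold Spec_areOccurrencesEqual
  cases ht : s.toList with
  | nil => exact absurd (String.toList_eq_nil_iff.mp ht) hpre
  | cons c0 rest =>
      have hne : PySem.List.sorted s.toList (fun c => c) false ≠ [] := by
        rw [Ne, PySem.List.sorted_eq_nil_iff, ht]; simp
      cases hsort : PySem.List.sorted s.toList (fun c => c) false with
      | nil => exact absurd hsort hne
      | cons d0 rs =>
          have hperm : (d0 :: rs).Perm (c0 :: rest) := by
            have := PySem.List.sorted_perm s.toList (fun c => c) false
            rw [hsort, ht] at this
            exact this
          rw [Bool.eq_iff_iff, pvA_iff s c0 rest ht, pvB_iff s d0 rs hsort]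
          exact (pvAllEq_perm (d0 :: rs) (c0 :: rest) hperm).symm
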